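-- pv_equiv track=rewrite | github.com/TirthPShah/PDEU-Sem-5 | Lab/Information Security/Lect2/PlayFairCypher.py | modifyInput
-- ===== SOURCE A (Python) =====
-- def modifyInput(input_message):
--     input_message = input_message.upper().replace(" ", "").replace("J", "I")
--     formatted_message = ""
--
--     i = 0
--     while i < len(input_message):
--         formatted_message += input_message[i]
--         if i + 1 < len(input_message):
--             if input_message[i] == input_message[i + 1]:
--                 formatted_message += 'X'
--                 i += 1
--             else:
--                 formatted_message += input_message[i + 1]
--                 i += 2
--         else:
--             formatted_message += 'X'
--             i += 1
--
--     return formatted_message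
-- ===== SOURCE B (Python) =====
-- def modifyInput(input_message):
--     input_message = input_message.upper().replace(" ", "").replace("J", "I")
--     out = []
--     pending = ''
--     for c in input_message:
--         if not pending:
--             pending = c
--         elif pending == c:
--             out.append(pending)
--             out.append('X')
--             pending = c
--         else:
--             out.append(pending)
--             out.append(c)
--             pending = ''
--     if pending:
--         out.append(pending)
--         out.append('X')
--     return ''.join(out)
-- ===== Notes on version B (the rewrite author's own statement) =====
-- stated objective: faster
-- what changed: Replaced the index-driven while loop with manual i increments and repeated string concatenation by a single for-each pass maintaining a one-char pending buffer, appending to a list joined once at the end.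
import Mathlib
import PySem

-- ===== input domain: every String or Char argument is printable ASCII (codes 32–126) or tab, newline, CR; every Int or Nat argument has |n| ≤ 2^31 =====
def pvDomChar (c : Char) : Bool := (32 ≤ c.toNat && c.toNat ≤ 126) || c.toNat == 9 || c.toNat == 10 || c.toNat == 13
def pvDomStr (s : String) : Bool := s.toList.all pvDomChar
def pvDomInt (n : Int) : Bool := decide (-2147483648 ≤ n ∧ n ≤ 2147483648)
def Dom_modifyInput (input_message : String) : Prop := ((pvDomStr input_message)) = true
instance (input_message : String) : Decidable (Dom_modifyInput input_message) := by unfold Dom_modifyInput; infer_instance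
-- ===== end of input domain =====

-- B replaces A's index-driven while loop (with manual i increments and string concatenation)
-- by a single for-each pass over the characters keeping a one-char pending buffer; same return value.

-- ===== PORT A =====
-- A's while loop: i is the index, acc the accumulated formatted_message.
def pvALoop (cs : List Char) (i : Nat) (acc : List Char) : List Char :=
  if h : i < cs.length then
    if h2 : i + 1 < cs.length then
      if cs[i] == cs[i + 1] then pvALoop cs (i + 1) (acc ++ [cs[i], 'X'])
      else pvALoop cs (i + 2) (acc ++ [cs[i], cs[i + 1]])
    else acc ++ [cs[i], 'X']
  else acc
termination_by cs.length - i

def modifyInput (input_message : String) : String :=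
  let s := PySem.Str.replace (PySem.Str.replace (PySem.Str.upper input_message) " " "") "J" "I"
  String.ofList (pvALoop s.toList 0 [])

-- ===== PORT B =====
-- B's loop body: state = (output list, pending buffer; none = empty pending)
def pvBStep (st : List Char × Option Char) (c : Char) : List Char × Option Char :=
  match st with
  | (out, none) => (out, some c)
  | (out, some p) => if p == c then (out ++ [p, 'X'], some c) else (out ++ [p, c], none)

-- B's final flush of a nonempty pending buffer
def pvBFlush (st : List Char × Option Char) : List Char :=
  match st with
  | (out, none) => out
  | (out, some p) => out ++ [p, 'X']

def modifyInput_alt (input_message : String) : String :=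
  let s := PySem.Str.replace (PySem.Str.replace (PySem.Str.upper input_message) " " "") "J" "I"
  String.ofList (pvBFlush (s.toList.foldl pvBStep ([], none)))

-- ===== PRECONDITION & SPEC =====
def Spec_modifyInput (input_message : String) (out : String) : Prop := out = modifyInput_alt input_message
instance (input_message : String) (out : String) : Decidable (Spec_modifyInput input_message out) := by unfold Spec_modifyInput; infer_instance

-- ===== CLAIM (what is proved, stated in full; the proofs are below) =====
def Claim_equal_modifyInput : Prop := ∀ (input_message : String), Dom_modifyInput input_message → Spec_modifyInput input_message (modifyInput input_message)

-- ===== LEMMAS AND PROOFS =====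

-- the common digraph decomposition both loops compute
def pvPair : List Char → List Char
  | [] => []
  | [c] => [c, 'X']
  | c :: d :: r => if c == d then c :: 'X' :: pvPair (d :: r) else c :: d :: pvPair r

theorem pvALoop_eq (cs : List Char) (i : Nat) (acc : List Char) :
    pvALoop cs i acc = acc ++ pvPair (cs.drop i) := by
  fun_induction pvALoop cs i acc with
  | case1 i acc h h2 heq ih =>
      rw [ih, List.drop_eq_getElem_cons h, List.drop_eq_getElem_cons h2]
      simp [pvPair, heq, List.append_assoc]
  | case2 i acc h h2 heq ih =>
      rw [ih, List.drop_eq_getElem_cons h, List.drop_eq_getElem_cons h2]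
      have : cs.drop (i + 1 + 1) = cs.drop (i + 2) := by ring_nf
      simp [pvPair, heq, List.append_assoc, this]
  | case3 i acc h h2 =>
      rw [List.drop_eq_getElem_cons h]
      have hlen : cs.length = i + 1 := by omega
      have : cs.drop (i + 1) = [] := by
        apply List.drop_eq_nil_of_le; omega
      simp [pvPair, this]
  | case4 i acc h =>
      have : cs.drop i = [] := by apply List.drop_eq_nil_of_le; omega
      simp [pvPair, this]

theorem pvB_eq (cs : List Char) (out : List Char) (st : Option Char) :
    pvBFlush (cs.foldl pvBStep (out, st)) =
      out ++ (match st with | none => pvPair cs | some p => pvPair (p :: cs)) := by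
  induction cs generalizing out st with
  | nil =>
      cases st <;> simp [pvBFlush, pvPair]
  | cons c r ih =>
      cases st with
      | none =>
          simp only [List.foldl_cons, pvBStep]
          rw [ih]
      | some p =>
          by_cases hpc : p == c
          · simp only [List.foldl_cons, pvBStep, hpc, if_pos]
            rw [ih]
            simp [pvPair, hpc, List.append_assoc]
          · simp only [List.foldl_cons, pvBStep, hpc, if_neg, Bool.false_eq_true, not_false_iff]
            rw [ih]
            cases r <;> simp [pvPair, hpc, List.append_assoc]

-- ===== VERDICT (by name: the statement is the Claim_ definition above) =====
theorem modifyInput_spec : Claim_equal_modifyInput := by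
  intro m _
  unfold Spec_modifyInput modifyInput modifyInput_alt
  simp only [pvALoop_eq, pvB_eq, List.nil_append, List.drop_zero]
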